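-- pv_equiv track=rewrite | github.com/chr116107109/AtCoder-ABC | 326/326_F.py | get_kouho
-- ===== SOURCE A (Python) =====
-- def get_kouho(A):
--     res = {}
--     for bit in range(2**len(A)):
--         score = 0
--         s = ''
--         for i in range(len(A)):
--             if bit & (1<<i) == 0:
--                 score -= A[i]
--                 s += 'N'
--             else:
--                 score += A[i]
--                 s += 'P'
--         res[score] = s
--
--     return res
-- ===== SOURCE B (Python) =====
-- def get_kouho(A):
--     # Incremental doubling: build all 2^n (score, signs) pairs in binary-counter
--     # order, each derived from a previous pair, then collapse into the dict.
--     pairs = [(0, '')]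
--     for a in A:
--         pairs = [(sc - a, s + 'N') for sc, s in pairs] + \
--                 [(sc + a, s + 'P') for sc, s in pairs]
--     res = {}
--     for sc, s in pairs:
--         res[sc] = s
--     return res
-- ===== Notes on version B (the rewrite author's own statement) =====
-- stated objective: alternative
-- what changed: Instead of recomputing score and sign string from the bits of each counter value, B doubles a list of (score, signs) pairs once per element (the doubling order equals the binary-counter order), then collapses the pairs into the dict; it trades per-mask bit arithmetic for incremental list doubling at the same overall cost.
import Mathlib
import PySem

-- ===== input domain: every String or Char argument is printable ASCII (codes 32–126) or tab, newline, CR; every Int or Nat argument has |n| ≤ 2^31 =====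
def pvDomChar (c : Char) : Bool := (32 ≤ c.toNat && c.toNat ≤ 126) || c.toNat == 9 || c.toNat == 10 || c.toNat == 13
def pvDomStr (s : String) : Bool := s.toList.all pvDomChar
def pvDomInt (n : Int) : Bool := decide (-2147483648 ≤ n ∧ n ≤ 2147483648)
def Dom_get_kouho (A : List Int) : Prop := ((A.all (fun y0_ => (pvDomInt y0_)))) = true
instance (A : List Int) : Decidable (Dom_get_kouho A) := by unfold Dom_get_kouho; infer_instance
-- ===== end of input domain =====

-- B replaces the per-mask recomputation (score and sign string rebuilt from the bits of
-- every counter value) by incremental doubling of the (score, signs) pair list, which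
-- visits the masks in the same binary-counter order (objective: alternative algorithm).

-- ===== PORT A =====
def get_kouho (A : List Int) : List (Int × String) :=
  let res : PySem.Dict Int String := PySem.Dict.empty
  let res := (PySem.List.pyRange 0 ((2:Int) ^ A.length) 1).foldl (fun res bit =>
    -- inner loop: score = 0; s = ''; for i in range(len(A)): …
    let p := (PySem.List.pyRange 0 (A.length : Int) 1).foldl (fun (p : Int × String) i =>
      -- '1 << i': i comes from range(len(A)) so i ≥ 0 and the Nat shift is exact
      if PySem.Int.band bit ((1:Int) <<< i.toNat) == 0 then
        (p.1 - PySem.List.pyGetD A i 0, p.2 ++ "N")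
      else
        (p.1 + PySem.List.pyGetD A i 0, p.2 ++ "P")) ((0:Int), "")
    res.insert p.1 p.2) res
  res.items

-- ===== PORT B =====
def get_kouho_alt (A : List Int) : List (Int × String) :=
  let pairs := A.foldl (fun ps a =>
    ps.map (fun p => (p.1 - a, p.2 ++ "N")) ++ ps.map (fun p => (p.1 + a, p.2 ++ "P")))
    [((0:Int), "")]
  (pairs.foldl (fun (res : PySem.Dict Int String) p => res.insert p.1 p.2)
    PySem.Dict.empty).items

-- ===== PRECONDITION & SPEC =====
def Spec_get_kouho (A : List Int) (out : List (Int × String)) : Prop := out = get_kouho_alt A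
instance (A : List Int) (out : List (Int × String)) : Decidable (Spec_get_kouho A out) := by unfold Spec_get_kouho; infer_instance

-- ===== CLAIM (what is proved, stated in full; the proofs are below) =====
def Claim_equal_get_kouho : Prop := ∀ (A : List Int), Dom_get_kouho A → Spec_get_kouho A (get_kouho A)

-- ===== LEMMAS AND PROOFS =====

-- A's inner loop for mask k, phrased over Nat bit tests
def pvInner (A : List Int) (k : Nat) : Int × String :=
  (List.range A.length).foldl (fun p i =>
    if k.testBit i then (p.1 + A.getD i 0, p.2 ++ "P")
    else (p.1 - A.getD i 0, p.2 ++ "N")) ((0:Int), "")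

-- B's doubled pair list
def pvDbl (A : List Int) : List (Int × String) :=
  A.foldl (fun ps a =>
    ps.map (fun p => (p.1 - a, p.2 ++ "N")) ++ ps.map (fun p => (p.1 + a, p.2 ++ "P")))
    [((0:Int), "")]

-- 'bit & (1 << i) == 0' is the negated i-th bit test
theorem pvBand_cond (k i : Nat) :
    (PySem.Int.band (k : Int) ((1:Int) <<< (i:Int)) == 0) = !k.testBit i := by
  rw [Int.one_shiftLeft, PySem.Int.band_natCast]
  rcases h : k.testBit i with _ | _
  · simp [Nat.and_two_pow, h]
  · simp [Nat.and_two_pow, h]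

-- A's inner loop equals pvInner on the mask's Nat value
theorem pvInner_eq (A : List Int) (bit : Int) (hb : 0 ≤ bit) :
    (PySem.List.pyRange 0 (A.length : Int) 1).foldl (fun (p : Int × String) i =>
      if PySem.Int.band bit ((1:Int) <<< i.toNat) == 0 then
        (p.1 - PySem.List.pyGetD A i 0, p.2 ++ "N")
      else
        (p.1 + PySem.List.pyGetD A i 0, p.2 ++ "P")) ((0:Int), "") = pvInner A bit.toNat := by
  obtain ⟨k, rfl⟩ : ∃ k : Nat, bit = (k : Int) := ⟨bit.toNat, (Int.toNat_of_nonneg hb).symm⟩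
  rw [PySem.List.pyRange_one, List.foldl_map]
  unfold pvInner
  apply PySem.List.foldl_congr_mem
  intro p i hi
  have h1 : ((0:Int) + (i:Int)).toNat = i := by omega
  rw [h1, pvBand_cond]
  rcases h : k.testBit i with _ | _ <;> simp [h]

-- pvInner only reads the bits below A.length
theorem pvInner_cong (A : List Int) (m m' : Nat)
    (h : ∀ i, i < A.length → m.testBit i = m'.testBit i) : pvInner A m = pvInner A m' := by
  unfold pvInner
  apply PySem.List.foldl_congr_mem
  intro p i hi
  rw [h i (List.mem_range.mp hi)]

-- appending an element adds one final step governed by bit A.length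
theorem pvInner_append (A : List Int) (a : Int) (m : Nat) :
    pvInner (A ++ [a]) m =
      if m.testBit A.length then ((pvInner A m).1 + a, (pvInner A m).2 ++ "P")
      else ((pvInner A m).1 - a, (pvInner A m).2 ++ "N") := by
  unfold pvInner
  rw [List.length_append, List.length_singleton, List.range_succ, List.foldl_append]
  have h1 : (List.range A.length).foldl (fun p i =>
      if m.testBit i then (p.1 + (A ++ [a]).getD i 0, p.2 ++ "P")
      else (p.1 - (A ++ [a]).getD i 0, p.2 ++ "N")) ((0:Int), "") =
      (List.range A.length).foldl (fun p i =>
      if m.testBit i then (p.1 + A.getD i 0, p.2 ++ "P")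
      else (p.1 - A.getD i 0, p.2 ++ "N")) ((0:Int), "") := by
    apply PySem.List.foldl_congr_mem
    intro p i hi
    rw [List.getD_append _ _ _ _ (List.mem_range.mp hi)]
  have h2 : (A ++ [a]).getD A.length 0 = a := by
    simp [List.getD_eq_getElem?_getD]
  simp only [List.foldl_cons, List.foldl_nil, h1, h2]

-- MAIN: the masks 0 .. 2^n - 1 in counter order give exactly B's doubled list
theorem pvDbl_eq (A : List Int) :
    (List.range (2 ^ A.length)).map (pvInner A) = pvDbl A := by
  induction A using List.reverseRecOn with
  | nil => simp [pvDbl, pvInner]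
  | append_singleton A a ih =>
    have hstep : pvDbl (A ++ [a]) =
        (pvDbl A).map (fun p => (p.1 - a, p.2 ++ "N")) ++
        (pvDbl A).map (fun p => (p.1 + a, p.2 ++ "P")) := by
      unfold pvDbl
      rw [List.foldl_append, List.foldl_cons, List.foldl_nil]
    rw [hstep, ← ih]
    have hlen : 2 ^ (A ++ [a]).length = 2 ^ A.length + 2 ^ A.length := by
      simp [List.length_append, pow_succ]; ring
    rw [hlen, List.range_add, List.map_append, List.map_map, List.map_map, List.map_map]
    congr 1
    · apply List.map_congr_left
      intro k hk
      rw [pvInner_append, Nat.testBit_lt_two_pow (List.mem_range.mp hk)]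
      simp
    · apply List.map_congr_left
      intro k hk
      have hk' := List.mem_range.mp hk
      have hcong : pvInner A (2 ^ A.length + k) = pvInner A k := by
        apply pvInner_cong
        intro i hilt
        exact Nat.testBit_two_pow_add_gt hilt k
      simp only [Function.comp]
      rw [pvInner_append, Nat.testBit_two_pow_add_eq, Nat.testBit_lt_two_pow hk', hcong]
      simp

theorem get_kouho_eq_alt (A : List Int) : get_kouho A = get_kouho_alt A := by
  unfold get_kouho get_kouho_alt
  simp only []
  congr 1
  trans ((PySem.List.pyRange 0 ((2:Int) ^ A.length) 1).foldl
      (fun (d : PySem.Dict Int String) (bit : Int) =>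
        d.insert (pvInner A bit.toNat).1 (pvInner A bit.toNat).2) PySem.Dict.empty)
  · apply PySem.List.foldl_congr_mem
    intro d bit hbit
    have hb : 0 ≤ bit := (PySem.List.mem_pyRange_one.mp hbit).1
    rw [pvInner_eq A bit hb]
  · rw [PySem.List.pyRange_one, List.foldl_map]
    simp only [zero_add, Int.toNat_natCast]
    have hx : (((2:Int) ^ A.length) - 0).toNat = 2 ^ A.length := by
      rw [sub_zero]
      rw [show ((2:Int) ^ A.length) = ((2 ^ A.length : Nat) : Int) by push_cast; ring]
      exact Int.toNat_natCast _
    rw [hx, ← List.foldl_map (f := pvInner A)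
        (g := fun (d : PySem.Dict Int String) p => d.insert p.1 p.2), pvDbl_eq]
    rfl

-- ===== VERDICT (by name: the statement is the Claim_ definition above) =====
theorem get_kouho_spec : Claim_equal_get_kouho := by
  intro A _
  unfold Spec_get_kouho
  exact get_kouho_eq_alt A
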